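-- pv_equiv track=rewrite | github.com/KumbalaManasa/DSA_Codes | sqrt_of_num.py | sqrt_num
-- ===== SOURCE A (Python) =====
-- def sqrt_num(num):
--     low = 0
--     high = num
--     ans = 0
--     while low<=high:
--         mid = (low+high)//2
--         if mid*mid == num:
--             ans = mid
--             return ans
--         elif mid*mid < num:
--             low = mid+1
--         else:
--             high = mid-1
-- ===== SOURCE B (Python) =====
-- def sqrt_num(num):
--     if num < 0:
--         return None
--     if num == 0:
--         return 0
--     x = num
--     y = (x + num // x) // 2
--     while y < x:
--         x = y
--         y = (x + num // x) // 2
--     return x if x * x == num else None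
-- ===== Notes on version B (the rewrite author's own statement) =====
-- stated objective: alternative
-- what changed: Replaced A's binary search over the bracket from zero to num with the classic integer Newton (Heron) iteration converging to the floor square root, followed by a single perfect-square check; negatives and zero are handled up front.
import Mathlib
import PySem

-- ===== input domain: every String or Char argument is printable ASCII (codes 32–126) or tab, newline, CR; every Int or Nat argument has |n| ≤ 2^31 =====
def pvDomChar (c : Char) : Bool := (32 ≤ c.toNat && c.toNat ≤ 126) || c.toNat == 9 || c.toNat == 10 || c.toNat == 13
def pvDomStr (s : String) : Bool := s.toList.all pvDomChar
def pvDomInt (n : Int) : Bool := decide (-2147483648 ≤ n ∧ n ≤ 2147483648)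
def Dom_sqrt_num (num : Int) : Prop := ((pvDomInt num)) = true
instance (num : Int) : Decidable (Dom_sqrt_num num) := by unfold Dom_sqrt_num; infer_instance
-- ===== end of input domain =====

-- B replaces A's binary search with integer Newton iteration (the classic isqrt loop)
-- plus one final perfect-square check; 'alternative' objective, return value only.


-- ===== PORT A =====
-- the while-loop of A: state (low, high); returns some mid on the perfect-square hit,
-- none when the loop exits (Python's implicit 'return None')
def sqrtLoop (num low high : Int) : Option Int :=
  if h : low ≤ high then
    let mid := PySem.Int.floordiv (low + high) 2
    if mid * mid = num then some mid
    else if mid * mid < num then sqrtLoop num (mid + 1) high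
    else sqrtLoop num low (mid - 1)
  else none
termination_by (high + 1 - low).toNat
decreasing_by
  · have := PySem.Int.floordiv_two_mid_bounds h; omega
  · have := PySem.Int.floordiv_two_mid_bounds h; omega

def sqrt_num (num : Int) : Option Int := sqrtLoop num 0 num

-- ===== PORT B =====
-- Newton iteration x ← (x + num // x) // 2, stopping when it no longer decreases.
-- The '0 < x' conjunct only makes the recursion total; it always holds on the calls B makes.
def newtonLoop (num x : Int) : Int :=
  let y := PySem.Int.floordiv (x + PySem.Int.floordiv num x) 2
  if _h : y < x ∧ 0 < x then newtonLoop num y else x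
termination_by x.toNat
decreasing_by omega

def sqrt_num_alt (num : Int) : Option Int :=
  if num < 0 then none
  else if num = 0 then some 0
  else
    let x := newtonLoop num num
    if x * x = num then some x else none

-- ===== PRECONDITION & SPEC =====
def Spec_sqrt_num (num : Int) (out : Option Int) : Prop := out = sqrt_num_alt num
instance (num : Int) (out : Option Int) : Decidable (Spec_sqrt_num num out) := by unfold Spec_sqrt_num; infer_instance

-- ===== CLAIM (what is proved, stated in full; the proofs are below) =====
def Claim_equal_sqrt_num : Prop := ∀ (num : Int), Dom_sqrt_num num → Spec_sqrt_num num (sqrt_num num)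

-- ===== LEMMAS AND PROOFS =====

-- basic facts about Int.sqrt (defined as ↑(Nat.sqrt ·.toNat))
theorem intSqrt_sq_le (n : Int) (h : 0 ≤ n) : Int.sqrt n * Int.sqrt n ≤ n := by
  have h1 : (Nat.sqrt n.toNat : Int) * (Nat.sqrt n.toNat : Int) ≤ (n.toNat : Int) := by
    have := Nat.sqrt_le' n.toNat
    rw [pow_two] at this
    exact_mod_cast this
  unfold Int.sqrt
  omega

theorem intSqrt_lt_succ (n : Int) :
    n < (Int.sqrt n + 1) * (Int.sqrt n + 1) := by
  have h1 : (n.toNat : Int) < ((Nat.sqrt n.toNat : Int) + 1) * ((Nat.sqrt n.toNat : Int) + 1) := by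
    have := Nat.lt_succ_sqrt' n.toNat
    rw [Nat.succ_eq_add_one, pow_two] at this
    exact_mod_cast this
  have h2 := Int.self_le_toNat n
  unfold Int.sqrt
  linarith

-- soundness of A's loop: a returned value is a root lying in [low, high]
theorem sqrtLoop_sound (num low high m : Int)
    (h : sqrtLoop num low high = some m) :
    low ≤ m ∧ m ≤ high ∧ m * m = num := by
  fun_induction sqrtLoop num low high with
  | case1 low high hle mid hmid =>
    have hb := PySem.Int.floordiv_two_mid_bounds hle
    injection h with h
    subst h
    exact ⟨by omega, by omega, hmid⟩
  | case2 low high hle mid hne hlt ih =>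
    have hb := PySem.Int.floordiv_two_mid_bounds hle
    have := ih h
    exact ⟨by omega, by omega, this.2.2⟩
  | case3 low high hle mid hne hge ih =>
    have hb := PySem.Int.floordiv_two_mid_bounds hle
    have := ih h
    exact ⟨by omega, by omega, this.2.2⟩
  | case4 low high hgt => simp at h

-- completeness of A's loop: a nonnegative root inside the bracket is found
theorem sqrtLoop_complete (num low high r : Int)
    (h0 : 0 ≤ low) (h1 : low ≤ r) (h2 : r ≤ high) (hr : r * r = num) :
    sqrtLoop num low high = some r := by
  fun_induction sqrtLoop num low high with
  | case1 low high hle mid hmid =>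
    have hb := PySem.Int.floordiv_two_mid_bounds hle
    have hmr : mid = r := by nlinarith
    rw [hmr]
  | case2 low high hle mid hne hlt ih =>
    have hb := PySem.Int.floordiv_two_mid_bounds hle
    have hmr : mid < r := by nlinarith
    exact ih (by omega) (by omega) h2
  | case3 low high hle mid hne hge ih =>
    have hb := PySem.Int.floordiv_two_mid_bounds hle
    have hgt : num < mid * mid := by omega
    have hmr : r < mid := by nlinarith
    exact ih h0 h1 (by omega)
  | case4 low high hgt => omega

-- AM-GM step of Newton: the iterate never drops below ⌊√num⌋
theorem newton_step_ge_sqrt (num x : Int) (hx : 0 < x) (hn : 0 ≤ num) :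
    Int.sqrt num ≤ PySem.Int.floordiv (x + PySem.Int.floordiv num x) 2 := by
  set s := Int.sqrt num with hs
  have hs0 : 0 ≤ s := Int.sqrt_nonneg num
  have hs1 : s * s ≤ num := intSqrt_sq_le num hn
  rw [PySem.Int.floordiv_eq_ediv_of_pos hx, PySem.Int.floordiv_eq_ediv_of_pos (by omega : (0:Int) < 2)]
  set q := num / x with hq
  have hq1 : q * x ≤ num := Int.ediv_mul_le num (by omega)
  have hq2 : num < (q + 1) * x := Int.lt_ediv_add_one_mul_self num hx
  set y := (x + q) / 2 with hy
  have hy1 : 2 * y ≤ x + q ∧ x + q < 2 * y + 2 := by omega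
  by_contra hcon
  push_neg at hcon
  nlinarith [sq_nonneg (x - s), hy1.1, hy1.2]

-- Newton's loop computes ⌊√num⌋ from any start x ≥ ⌊√num⌋
theorem newtonLoop_eq_sqrt (num : Int) (hn : 0 ≤ num) :
    ∀ x : Int, Int.sqrt num ≤ x → newtonLoop num x = Int.sqrt num := by
  intro x
  fun_induction newtonLoop num x with
  | case1 x y hguard ih =>
    intro hxs
    have hstep : Int.sqrt num ≤ y := newton_step_ge_sqrt num x hguard.2 hn
    exact ih hstep
  | case2 x y hguard =>
    intro hxs
    push_neg at hguard
    rcases lt_or_ge 0 x with hxpos | hxz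
    · -- x ≤ y: then num // x ≥ x, so x * x ≤ num, so x ≤ √num
      have hyx : x ≤ PySem.Int.floordiv (x + PySem.Int.floordiv num x) 2 := by
        by_cases hyl : y < x
        · exact absurd (hguard hyl) (by omega)
        · omega
      rw [PySem.Int.floordiv_eq_ediv_of_pos hxpos,
          PySem.Int.floordiv_eq_ediv_of_pos (by omega : (0:Int) < 2)] at hyx
      set q := num / x with hq
      have hq1 : q * x ≤ num := Int.ediv_mul_le num (by omega)
      have hq2 : num < (q + 1) * x := Int.lt_ediv_add_one_mul_self num hxpos
      have hqx : x ≤ q := by omega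
      have hxx : x * x ≤ num := le_trans (by nlinarith) hq1
      have hsucc := intSqrt_lt_succ num
      have hle : x ≤ Int.sqrt num := by nlinarith [Int.sqrt_nonneg num]
      omega
    · have hs0 := Int.sqrt_nonneg num
      omega

-- √num ≤ num for 0 ≤ num
theorem intSqrt_le_self (n : Int) (h : 0 ≤ n) : Int.sqrt n ≤ n := by
  have h1 := intSqrt_sq_le n h
  have h0 := Int.sqrt_nonneg n
  nlinarith

-- ===== VERDICT (by name: the statement is the Claim_ definition above) =====
theorem sqrt_num_spec : Claim_equal_sqrt_num := by
  intro num _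
  unfold Spec_sqrt_num sqrt_num sqrt_num_alt
  rcases lt_trichotomy num 0 with hneg | hzero | hpos
  · rw [if_pos hneg, sqrtLoop.eq_def, dif_neg (by omega : ¬ (0:Int) ≤ num)]
  · subst hzero
    rw [sqrtLoop.eq_def]
    norm_num [PySem.Int.floordiv_eq_ediv_of_pos (by norm_num : (0:Int) < 2)]
  · rw [if_neg (by omega), if_neg (by omega)]
    have hn : 0 ≤ num := le_of_lt hpos
    have hN : newtonLoop num num = Int.sqrt num :=
      newtonLoop_eq_sqrt num hn num (intSqrt_le_self num hn)
    simp only [hN]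
    by_cases hsq : Int.sqrt num * Int.sqrt num = num
    · rw [if_pos hsq]
      exact sqrtLoop_complete num 0 num (Int.sqrt num) le_rfl (Int.sqrt_nonneg num)
        (intSqrt_le_self num hn) hsq
    · rw [if_neg hsq]
      cases hA : sqrtLoop num 0 num with
      | none => rfl
      | some m =>
        exfalso
        obtain ⟨hm0, hmN, hmm⟩ := sqrtLoop_sound num 0 num m hA
        have hsm : Int.sqrt num = m := by
          rw [← hmm, Int.sqrt_eq]; omega
        exact hsq (by rw [hsm]; exact hmm)
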